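-- pv_equiv track=rewrite | github.com/seheonnn/Algorithm | Programmers/PCCP/1-1 외톨이 알파벳.py | solution
-- ===== SOURCE A (Python) =====
-- def solution(input_string):
--     answer = set()
--     exist = set()
--     prev = None
--     for c in input_string:
--         if c != prev:
--             if c in exist:
--                 answer.add(c)
--             else:
--                 exist.add(c)
--             prev = c
--
--     return ''.join(sorted(answer)) if answer else 'N'
-- ===== SOURCE B (Python) =====
-- def solution(input_string):
--     # group -> tabulate -> filter pipeline instead of an incremental prev/exist/answer pass
--     keys = []
--     for c in input_string:
--         if not keys or keys[-1] != c:
--             keys.append(c)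
--     counts = {}
--     for k in keys:
--         counts[k] = counts.get(k, 0) + 1
--     loners = sorted(c for c, n in counts.items() if n >= 2)
--     return ''.join(loners) if loners else 'N'
-- ===== Notes on version B (the rewrite author's own statement) =====
-- stated objective: alternative
-- what changed: Replaces the single pass maintaining prev/exist/answer sets with a three-stage pipeline: run-compress the string into its group keys, tabulate key frequencies in a dict, then filter keys occurring at least twice and sort them.
import Mathlib
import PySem

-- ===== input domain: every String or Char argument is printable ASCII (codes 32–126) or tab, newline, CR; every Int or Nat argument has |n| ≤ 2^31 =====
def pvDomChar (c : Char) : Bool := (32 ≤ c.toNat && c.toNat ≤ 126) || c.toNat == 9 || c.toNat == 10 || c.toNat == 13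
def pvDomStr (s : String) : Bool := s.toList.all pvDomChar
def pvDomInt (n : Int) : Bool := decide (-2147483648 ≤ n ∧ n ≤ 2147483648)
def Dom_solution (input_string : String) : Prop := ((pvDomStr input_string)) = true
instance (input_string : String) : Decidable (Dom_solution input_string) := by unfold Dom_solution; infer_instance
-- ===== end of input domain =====

-- B re-decomposes A's incremental prev/exist/answer pass as a run-compress → count → filter-sort pipeline (alternative decomposition, same cost).

-- ===== PORT A =====
-- loop body of A: if c != prev: add c to answer (seen) or exist (new); prev = c
def solnStep (st : PySem.Set Char × PySem.Set Char × Option Char) (c : Char) :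
    PySem.Set Char × PySem.Set Char × Option Char :=
  if some c ≠ st.2.2 then
    if PySem.Set.contains st.2.1 c then (PySem.Set.add st.1 c, st.2.1, some c)
    else (st.1, PySem.Set.add st.2.1 c, some c)
  else st

def solution (input_string : String) : String :=
  let st := input_string.toList.foldl solnStep
    ((PySem.Set.empty : PySem.Set Char), (PySem.Set.empty : PySem.Set Char), (none : Option Char))
  if st.1 ≠ [] then String.ofList (PySem.List.sorted st.1 (fun x => x) false) else "N"

-- ===== PORT B =====
-- loop body of B's first stage: if not keys or keys[-1] != c: keys.append(c)
def altKeysStep (ks : List Char) (c : Char) : List Char :=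
  if ks.getLast? = some c then ks else ks ++ [c]

def solution_alt (input_string : String) : String :=
  let keys := input_string.toList.foldl altKeysStep []
  let counts := keys.foldl (fun d k => d.insert k (d.getD k 0 + 1)) (PySem.Dict.empty : PySem.Dict Char Int)
  let loners := PySem.List.sorted ((counts.items.filter (fun p => 2 ≤ p.2)).map Prod.fst) (fun x => x) false
  if loners ≠ [] then String.ofList loners else "N"

-- ===== PRECONDITION & SPEC =====
def Spec_solution (input_string : String) (out : String) : Prop := out = solution_alt input_string
instance (input_string : String) (out : String) : Decidable (Spec_solution input_string out) := by unfold Spec_solution; infer_instance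

-- ===== CLAIM (what is proved, stated in full; the proofs are below) =====
def Claim_equal_solution : Prop := ∀ (input_string : String), Dom_solution input_string → Spec_solution input_string (solution input_string)

-- ===== LEMMAS AND PROOFS =====

-- run-compression of a char list given the previous char
def compressFrom : Option Char → List Char → List Char
  | _, [] => []
  | p, c :: cs => if p = some c then compressFrom p cs else c :: compressFrom (some c) cs

-- A's set-updating pass over the compressed key list
def proc : List Char → PySem.Set Char × PySem.Set Char → PySem.Set Char × PySem.Set Char
  | [], s => s
  | k :: ks, s =>
    if PySem.Set.contains s.2 k then proc ks (PySem.Set.add s.1 k, s.2)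
    else proc ks (s.1, PySem.Set.add s.2 k)

def lastD (p : Option Char) (ks : List Char) : Option Char :=
  match ks.getLast? with
  | some k => some k
  | none => p

lemma lastD_cons (p : Option Char) (c : Char) (l : List Char) :
    lastD p (c :: l) = lastD (some c) l := by
  cases l with
  | nil => rfl
  | cons x xs =>
    cases hx : (x :: xs).getLast? with
    | none => simp [List.getLast?_eq_none_iff] at hx
    | some a => simp [lastD, List.getLast?_cons_cons, hx]

lemma foldA (cs : List Char) : ∀ (ans ex : PySem.Set Char) (p : Option Char),
    cs.foldl solnStep (ans, ex, p) =
      ((proc (compressFrom p cs) (ans, ex)).1, (proc (compressFrom p cs) (ans, ex)).2,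
        lastD p (compressFrom p cs)) := by
  induction cs with
  | nil => intro ans ex p; simp [compressFrom, proc, lastD]
  | cons c cs ih =>
    intro ans ex p
    by_cases hp : p = some c
    · subst hp
      simp only [List.foldl_cons, solnStep, compressFrom]
      simpa using ih ans ex (some c)
    · have hne : some c ≠ p := fun h => hp h.symm
      simp only [List.foldl_cons, solnStep, if_pos hne, compressFrom, if_neg hp, lastD_cons]
      by_cases hm : PySem.Set.contains ex c
      · simp only [hm, if_true, proc]
        exact ih (PySem.Set.add ans c) ex (some c)
      · simp only [hm, if_false, proc, Bool.false_eq_true]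
        exact ih ans (PySem.Set.add ex c) (some c)

lemma foldB (cs : List Char) : ∀ (acc : List Char),
    cs.foldl altKeysStep acc = acc ++ compressFrom acc.getLast? cs := by
  induction cs with
  | nil => intro acc; simp [compressFrom]
  | cons c cs ih =>
    intro acc
    rw [List.foldl_cons]
    by_cases h : acc.getLast? = some c
    · rw [show altKeysStep acc c = acc from by simp [altKeysStep, h], ih acc, h]
      have hc : compressFrom (some c) (c :: cs) = compressFrom (some c) cs := by
        simp [compressFrom]
      rw [hc]
    · rw [show altKeysStep acc c = acc ++ [c] from by simp [altKeysStep, h],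
        ih (acc ++ [c]), List.getLast?_concat]
      have hc : compressFrom acc.getLast? (c :: cs) = c :: compressFrom (some c) cs := by
        simp [compressFrom, h]
      rw [hc, List.append_assoc]
      rfl

lemma proc_ans_mem (ks : List Char) : ∀ (pre : List Char) (ans : PySem.Set Char) (c : Char),
    (c ∈ (proc ks (ans, PySem.Set.ofList pre)).1 ↔
      c ∈ ans ∨ (c ∈ ks ∧ (c ∈ pre ∨ 2 ≤ List.count c ks))) := by
  induction ks with
  | nil => intro pre ans c; simp [proc]
  | cons k ks ih =>
    intro pre ans c
    by_cases hk : k ∈ pre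
    · have hc : PySem.Set.contains (PySem.Set.ofList pre) k = true := by
        rw [PySem.Set.contains_iff]; exact (PySem.Set.mem_ofList _ _).2 hk
      simp only [proc, hc, if_true]
      rw [ih pre (PySem.Set.add ans k) c, PySem.Set.mem_add]
      by_cases hck : c = k
      · subst hck
        simp [hk, List.mem_cons]
      · have hcount : List.count c (k :: ks) = List.count c ks := by
          simp [Ne.symm hck]
        rw [hcount]
        simp only [List.mem_cons]
        tauto
    · have hc : PySem.Set.contains (PySem.Set.ofList pre) k = false := by
        rw [Bool.eq_false_iff]
        intro h; exact hk ((PySem.Set.mem_ofList _ _).1 ((PySem.Set.contains_iff _ _).1 h))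
      simp only [proc, hc, Bool.false_eq_true, if_false]
      rw [← PySem.Set.ofList_append_singleton, ih (pre ++ [k]) ans c]
      by_cases hck : c = k
      · subst hck
        have hone : c ∈ ks ↔ 0 < List.count c ks := List.count_pos_iff.symm
        have e1 : c ∈ pre ++ [c] := by simp
        have e2 : c ∈ c :: ks := by simp
        have e3 : List.count c (c :: ks) = List.count c ks + 1 := by simp
        rw [e3]
        constructor
        · rintro (h | ⟨hks, _⟩)
          · exact Or.inl h
          · exact Or.inr ⟨e2, Or.inr (by have := hone.1 hks; omega)⟩
        · rintro (h | ⟨_, hpre | hcnt⟩)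
          · exact Or.inl h
          · exact absurd hpre hk
          · exact Or.inr ⟨hone.2 (by omega), Or.inl e1⟩
      · have hcount : List.count c (k :: ks) = List.count c ks := by
          simp [Ne.symm hck]
        rw [hcount]
        simp only [List.mem_cons, List.mem_append]
        tauto

lemma proc_ans_nodup (ks : List Char) : ∀ (s : PySem.Set Char × PySem.Set Char),
    s.1.Nodup → (proc ks s).1.Nodup := by
  induction ks with
  | nil => intro s h; exact h
  | cons k ks ih =>
    intro s h
    unfold proc
    split
    · exact ih _ (PySem.Set.nodup_add _ _ h)
    · exact ih _ h

-- ===== VERDICT (by name: the statement is the Claim_ definition above) =====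
theorem solution_spec : Claim_equal_solution := by
  intro s _
  unfold Spec_solution solution solution_alt
  have hB := foldB s.toList []
  simp only [List.getLast?_nil, List.nil_append] at hB
  simp only [foldA s.toList PySem.Set.empty PySem.Set.empty none, hB,
    PySem.Dict.foldl_insert_getD_add_one_eq_counter, PySem.Dict.items_counter]
  set ks := compressFrom none s.toList with hks
  set ansF := (proc ks (PySem.Set.empty, PySem.Set.empty)).1 with hansF
  have hfm : (((PySem.Set.ofList ks).map (fun k => (k, (List.count k ks : Int)))).filter
        (fun p => decide (2 ≤ p.2))).map Prod.fst
      = (PySem.Set.ofList ks).filter (fun k => decide ((2 : Int) ≤ (List.count k ks : Int))) := by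
    rw [List.filter_map, List.map_map]
    simp [Function.comp_def]
  have hmemA : ∀ c, c ∈ ansF ↔ 2 ≤ List.count c ks := by
    intro c
    rw [hansF]
    rw [show (PySem.Set.empty : PySem.Set Char) = PySem.Set.ofList [] from rfl,
      proc_ans_mem ks [] (PySem.Set.ofList []) c]
    constructor
    · rintro (h | ⟨_, h | h⟩) <;> first | exact h | simp_all [PySem.Set.empty]
    · intro h
      exact Or.inr ⟨List.count_pos_iff.1 (by omega), Or.inr h⟩
  have hmemB : ∀ c, c ∈ (PySem.Set.ofList ks).filter (fun k => decide ((2 : Int) ≤ (List.count k ks : Int)))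
      ↔ 2 ≤ List.count c ks := by
    intro c
    rw [List.mem_filter, PySem.Set.mem_ofList]
    constructor
    · rintro ⟨_, h⟩
      have : (2 : Int) ≤ (List.count c ks : Int) := by simpa using h
      exact_mod_cast this
    · intro h
      refine ⟨List.count_pos_iff.1 (by omega), by simp; exact_mod_cast h⟩
  have hnodupA : ansF.Nodup := proc_ans_nodup ks _ List.nodup_nil
  have hnodupB : ((PySem.Set.ofList ks).filter (fun k => decide ((2 : Int) ≤ (List.count k ks : Int)))).Nodup :=
    (PySem.Set.nodup_ofList ks).filter _
  have hperm : ansF.Perm ((PySem.Set.ofList ks).filter (fun k => decide ((2 : Int) ≤ (List.count k ks : Int)))) :=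
    (List.perm_ext_iff_of_nodup hnodupA hnodupB).2 (fun c => by rw [hmemA, hmemB])
  have hsorted := PySem.List.sorted_eq_sorted_of_perm _ _ (fun x : Char => x)
    (fun a b h => h) hperm
  rw [hfm, ← hsorted]
  by_cases hnil : ansF = []
  · have hsnil : PySem.List.sorted ansF (fun x => x) false = [] := by
      rw [hnil]; rfl
    rw [if_neg (by simp [hnil]), if_neg (by simp [hsnil])]
  · have hsnil : PySem.List.sorted ansF (fun x => x) false ≠ [] := by
      simp only [ne_eq, PySem.List.sorted_eq_nil_iff]; exact hnil
    rw [if_pos hnil, if_pos hsnil]
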